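-- pv_equiv track=rewrite | github.com/maxipdev/Introduccion-a-la-programacion-1-UBA | python/clases de repaso/clase_repaso.py | escape_solitario
-- ===== SOURCE A (Python) =====
-- def escape_solitario(amigos_por_salas: list[list[int]]) -> list[int]:
--     res = []
--     for j in range(len(amigos_por_salas)):
--         sala = amigos_por_salas[j]
--         jugador = 1 # emoieza con el amigo ese
--         estado = True
--         for amigo in sala:
--             if jugador != 3:
--                 if amigo != 0:
--                     estado = False
--                     break  # sale del ciclo pq no lo esta cumpliendo
--             else : # jugador == 3
--                 if amigo == 0:
--                     estado = False
--                     break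
--
--             jugador += 1 # actualizamos el jugador
--
--         if estado :
--             res.append(j) # agrego la sala pq cumple la condicion
--     return  res
-- ===== SOURCE B (Python) =====
-- def escape_solitario(amigos_por_salas: list[list[int]]) -> list[int]:
--     def nonzero_positions(sala):
--         return [i for i, amigo in enumerate(sala) if amigo != 0]
--     return [j for j, sala in enumerate(amigos_por_salas)
--             if nonzero_positions(sala) == [2]
--             or (nonzero_positions(sala) == [] and len(sala) < 3)]
-- ===== Notes on version B (the rewrite author's own statement) =====
-- stated objective: alternative
-- what changed: Replaces A's per-room state machine (a jugador counter with early break inside an index loop) by a fingerprint comparison: compute each room's list of nonzero positions and accept the room iff that fingerprint is exactly [2], or it is empty and the room is shorter than 3.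
import Mathlib
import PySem

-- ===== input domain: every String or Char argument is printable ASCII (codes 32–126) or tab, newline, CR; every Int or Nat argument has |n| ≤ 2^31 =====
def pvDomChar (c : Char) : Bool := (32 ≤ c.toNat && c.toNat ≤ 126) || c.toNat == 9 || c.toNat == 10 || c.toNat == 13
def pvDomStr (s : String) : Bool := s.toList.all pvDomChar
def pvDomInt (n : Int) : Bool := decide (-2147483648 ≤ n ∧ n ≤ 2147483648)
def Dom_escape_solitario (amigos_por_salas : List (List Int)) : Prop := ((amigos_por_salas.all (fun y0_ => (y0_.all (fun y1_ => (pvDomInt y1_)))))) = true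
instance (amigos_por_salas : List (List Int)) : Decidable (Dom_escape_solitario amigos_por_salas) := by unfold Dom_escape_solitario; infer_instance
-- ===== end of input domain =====

-- B replaces A's per-room state machine (jugador counter with early break) by a fingerprint
-- comparison: the list of nonzero positions of a room must be exactly [2], or empty with
-- room length < 3; objective: alternative decomposition, not faster.

-- ===== PORT A =====
-- inner 'for amigo in sala' loop of A, carrying the 'jugador' counter; returns 'estado'
-- (break = returning false immediately)
def escInner : List Int → Int → Bool
  | [], _ => true
  | amigo :: rest, jugador =>
    if jugador ≠ 3 then
      if amigo ≠ 0 then false else escInner rest (jugador + 1)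
    else
      if amigo = 0 then false else escInner rest (jugador + 1)

def escape_solitario (amigos_por_salas : List (List Int)) : List Int :=
  (PySem.List.pyRange 0 (amigos_por_salas.length : Int) 1).foldl
    (fun res j =>
      let sala := PySem.List.pyGetD amigos_por_salas j []
      if escInner sala 1 then res ++ [j] else res) []

-- ===== PORT B =====
-- B's helper: the list of positions holding a nonzero entry
def nonzeroPositions (sala : List Int) : List Int :=
  ((PySem.List.enumerate sala 0).filter (fun p => !(p.2 == 0))).map (·.1)

def escape_solitario_alt (amigos_por_salas : List (List Int)) : List Int :=
  ((PySem.List.enumerate amigos_por_salas 0).filter (fun p =>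
      nonzeroPositions p.2 == [2] ||
      (nonzeroPositions p.2 == [] && decide (p.2.length < 3)))).map (·.1)

-- ===== PRECONDITION & SPEC =====
def Spec_escape_solitario (amigos_por_salas : List (List Int)) (out : List Int) : Prop := out = escape_solitario_alt amigos_por_salas
instance (amigos_por_salas : List (List Int)) (out : List Int) : Decidable (Spec_escape_solitario amigos_por_salas out) := by unfold Spec_escape_solitario; infer_instance

-- ===== CLAIM (what is proved, stated in full; the proofs are below) =====
def Claim_equal_escape_solitario : Prop := ∀ (amigos_por_salas : List (List Int)), Dom_escape_solitario amigos_por_salas → Spec_escape_solitario amigos_por_salas (escape_solitario amigos_por_salas)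

-- ===== LEMMAS AND PROOFS =====

-- nonzero positions of 'rest' counted from offset n — the tail of B's fingerprint
def nzFrom (rest : List Int) (n : Int) : List Int :=
  ((PySem.List.enumerate rest n).filter (fun p => !(p.2 == 0))).map (·.1)

lemma nzFrom_cons (a : Int) (rest : List Int) (n : Int) :
    nzFrom (a :: rest) n = (if a = 0 then [] else [n]) ++ nzFrom rest (n + 1) := by
  by_cases h : a = 0 <;> simp [nzFrom, PySem.List.enumerate_cons, h]

lemma nzFrom_eq_nil_iff (rest : List Int) (n : Int) :
    nzFrom rest n = [] ↔ rest.all (fun a => a = 0) := by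
  induction rest generalizing n with
  | nil => simp [nzFrom]
  | cons a rest ih =>
    rw [nzFrom_cons]
    by_cases h : a = 0 <;> simp [h, ih]

lemma two_not_mem_nzFrom (rest : List Int) (n : Int) (hn : 3 ≤ n) :
    (2 : Int) ∉ nzFrom rest n := by
  induction rest generalizing n with
  | nil => simp [nzFrom]
  | cons a rest ih =>
    rw [nzFrom_cons]
    by_cases h : a = 0
    · simp [h, ih (n + 1) (by omega)]
    · simp [h, ih (n + 1) (by omega)]
      omega

-- once 'jugador' has passed 3 it never equals 3 again, so A's tail loop just checks all zeros
lemma escInner_ge4 (rest : List Int) (j : Int) (hj : 4 ≤ j) :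
    escInner rest j = rest.all (fun a => a = 0) := by
  induction rest generalizing j with
  | nil => simp [escInner]
  | cons a rest ih =>
    simp only [escInner, if_pos (by omega : j ≠ 3)]
    by_cases h : a = 0 <;> simp [h, ih (j+1) (by omega)]

lemma nzFrom3_ne_two (rest : List Int) : ¬ nzFrom rest 3 = [2] := by
  intro heq
  exact two_not_mem_nzFrom rest 3 le_rfl (heq ▸ List.mem_singleton.mpr rfl)

lemma all_zero_eq_isEmpty (rest : List Int) :
    rest.all (fun a => decide (a = 0)) = (nzFrom rest 3).isEmpty := by
  rw [Bool.eq_iff_iff]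
  simp [List.isEmpty_iff, nzFrom_eq_nil_iff]

-- the per-room conditions agree: A's inner loop equals B's fingerprint test
lemma escInner_eq_fingerprint (sala : List Int) :
    escInner sala 1 =
      (nonzeroPositions sala == [2] ||
       (nonzeroPositions sala == [] && decide (sala.length < 3))) := by
  have hnz : nonzeroPositions sala = nzFrom sala 0 := rfl
  match sala with
  | [] => decide
  | [a] =>
    by_cases h : a = 0 <;> simp [escInner, nonzeroPositions, PySem.List.enumerate_cons, h]
  | [a, b] =>
    by_cases h : a = 0 <;> by_cases h2 : b = 0 <;>
      simp [escInner, nonzeroPositions, PySem.List.enumerate_cons, h, h2]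
  | a :: b :: c :: rest =>
    rw [hnz, nzFrom_cons, nzFrom_cons, nzFrom_cons]
    by_cases h : a = 0 <;> by_cases h2 : b = 0 <;> by_cases h3 : c = 0 <;>
      simp [escInner, h, h2, h3, escInner_ge4 rest 4 le_rfl,
        nzFrom3_ne_two, all_zero_eq_isEmpty, Nat.succ_lt_succ_iff]

-- ===== VERDICT (by name: the statement is the Claim_ definition above) =====
theorem escape_solitario_spec : Claim_equal_escape_solitario := by
  intro xs _
  show escape_solitario xs = escape_solitario_alt xs
  unfold escape_solitario escape_solitario_alt
  have h1 : PySem.List.pyRange 0 (xs.length : Int) 1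
      = (PySem.List.enumerate xs 0).map (·.1) := by
    rw [PySem.List.map_fst_enumerate]; norm_num
  rw [h1, List.foldl_map]
  rw [PySem.List.foldl_congr_mem _ _
    (fun res p => if (nonzeroPositions p.2 == [2] ||
        (nonzeroPositions p.2 == [] && decide (p.2.length < 3))) then res ++ [p.1] else res) []
    (by
      intro acc p hp
      rw [PySem.List.mem_enumerate_iff] at hp
      obtain ⟨k, hk, rfl⟩ := hp
      simp [PySem.List.pyGetD_natCast, escInner_eq_fingerprint,
        List.getElem?_eq_getElem hk])]
  simpa using PySem.List.foldl_append_if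
    (fun p : Int × List Int => (nonzeroPositions p.2 == [2] ||
      (nonzeroPositions p.2 == [] && decide (p.2.length < 3))))
    (fun p => p.1) (PySem.List.enumerate xs 0) []
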